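-- pv_equiv track=rewrite | github.com/ceerRep/Resppy | Resppy/base.py | sexpr_mangle
-- ===== SOURCE A (Python) =====
-- from keyword import iskeyword
--
-- mangle_prefix = "_S_"
--
-- mangle_replace = [
--     # ('_', '__'),
--     ('~', '_SP_'),
--     ('!', '_EX_'),
--     ('@', '_AT_'),
--     ('#', '_SH_'),
--     ('$', '_DL_'),
--     ('%', '_MO_'),
--     ('^', '_XO_'),
--     ('&', '_AN_'),
--     ('*', '_ST_'),
--     ('-', '_MI_'),
--     ('+', '_AD_'),
--     ('=', '_EQ_'),
--     ('\\', '_LS_'),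
--     ('|', '_MD_'),
--     # (':', '_CN_'),
--     ('?', '_QU_'),
--     ('/', '_SL_'),
--     (',', '_CO_'),
--     # ('.', '_DO_'),
--     ('<', '_LT_'),
--     ('>', '_GT_')
-- ]
--
-- def sexpr_mangle(name: str) -> str:
--     ret = name
--     for src, tg in mangle_replace:
--         ret = ret.replace(src, tg)
--
--     if iskeyword(name):
--         ret = mangle_prefix + ret
--
--     if not ret.replace('.', '_DO_').isidentifier():
--         raise ValueError("Invalid indentifier: %s -> %s" %
--                          (name, ret))
--     return ret
-- ===== SOURCE B (Python) =====
-- _KWLIST = frozenset([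
--     'False', 'None', 'True', 'and', 'as', 'assert', 'async', 'await', 'break',
--     'class', 'continue', 'def', 'del', 'elif', 'else', 'except', 'finally',
--     'for', 'from', 'global', 'if', 'import', 'in', 'is', 'lambda', 'nonlocal',
--     'not', 'or', 'pass', 'raise', 'return', 'try', 'while', 'with', 'yield'])
--
--
-- def iskeyword(name):
--     return name in _KWLIST
--
-- mangle_prefix = "_S_"
--
-- _SPECIALS = "~!@#$%^&*-+=\\|?/,<>"
--
--
-- def _mangle_char(ch):
--     if ch == '~': return '_SP_'
--     elif ch == '!': return '_EX_'
--     elif ch == '@': return '_AT_'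
--     elif ch == '#': return '_SH_'
--     elif ch == '$': return '_DL_'
--     elif ch == '%': return '_MO_'
--     elif ch == '^': return '_XO_'
--     elif ch == '&': return '_AN_'
--     elif ch == '*': return '_ST_'
--     elif ch == '-': return '_MI_'
--     elif ch == '+': return '_AD_'
--     elif ch == '=': return '_EQ_'
--     elif ch == '\\': return '_LS_'
--     elif ch == '|': return '_MD_'
--     elif ch == '?': return '_QU_'
--     elif ch == '/': return '_SL_'
--     elif ch == ',': return '_CO_'
--     elif ch == '<': return '_LT_'
--     elif ch == '>': return '_GT_'
--     else: return ch
--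
--
-- def _allowed(ch):
--     return ch.isalnum() or ch in '_.' + _SPECIALS
--
--
-- def sexpr_mangle(name: str) -> str:
--     # validate-first: reject the name up front instead of mangling and then
--     # testing the mangled result with isidentifier()
--     if (not name or name[0].isdigit()
--             or not all(_allowed(ch) for ch in name)):
--         raise ValueError("Invalid identifier: %s" % name)
--     ret = ''.join(_mangle_char(ch) for ch in name)
--     if iskeyword(name):
--         ret = mangle_prefix + ret
--     return ret
-- ===== Notes on version B (the rewrite author's own statement) =====
-- stated objective: alternative
-- what changed: A mangles first (19 sequential whole-string replace passes) and then validates the mangled result with isidentifier(); B validates the ORIGINAL name up front against a closed character set (alnum, '_', '.', the 19 specials, first char not a digit) and then builds the result in one per-character pass with an if/elif mapping - validate-then-transform instead of transform-then-validate.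
import Mathlib
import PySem

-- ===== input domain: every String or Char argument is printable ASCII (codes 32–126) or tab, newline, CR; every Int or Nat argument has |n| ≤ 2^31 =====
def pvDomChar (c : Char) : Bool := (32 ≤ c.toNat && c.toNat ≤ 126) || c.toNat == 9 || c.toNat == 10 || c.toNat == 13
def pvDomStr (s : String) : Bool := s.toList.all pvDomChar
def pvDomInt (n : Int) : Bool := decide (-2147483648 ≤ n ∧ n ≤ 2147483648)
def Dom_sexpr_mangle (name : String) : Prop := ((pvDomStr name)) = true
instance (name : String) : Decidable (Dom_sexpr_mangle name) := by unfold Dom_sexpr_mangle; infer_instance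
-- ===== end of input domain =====

-- B validates the ORIGINAL name up front against a closed character set and then mangles it in
-- one per-character pass, instead of A's 19 whole-string replace passes followed by an
-- isidentifier() test on the mangled result (alternative decomposition; identical results).

-- ===== PORT A =====
def mangle_prefix : String := "_S_"

def mangle_replace : List (String × String) := [("~", "_SP_"), ("!", "_EX_"), ("@", "_AT_"), ("#", "_SH_"), ("$", "_DL_"), ("%", "_MO_"), ("^", "_XO_"), ("&", "_AN_"), ("*", "_ST_"), ("-", "_MI_"), ("+", "_AD_"), ("=", "_EQ_"), ("\\", "_LS_"), ("|", "_MD_"), ("?", "_QU_"), ("/", "_SL_"), (",", "_CO_"), ("<", "_LT_"), (">", "_GT_")]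

-- keyword.kwlist of CPython 3 (keyword.iskeyword); both Pythons import iskeyword
def pvKwlist : List String := ["False", "None", "True", "and", "as", "assert", "async", "await", "break", "class", "continue", "def", "del", "elif", "else", "except", "finally", "for", "from", "global", "if", "import", "in", "is", "lambda", "nonlocal", "not", "or", "pass", "raise", "return", "try", "while", "with", "yield"]

def pyIskeyword (s : String) : Bool := pvKwlist.contains s

-- str.isidentifier, ported by hand (no PySem primitive); exact on the ASCII strings Dom admits:
-- first char a letter or '_', the rest letters, digits or '_'.
def pvIdList (l : List Char) : Bool :=
  match l with
  | [] => false
  | c :: t => (PySem.Chars.isalpha c || (c == '_')) && t.all (fun d => PySem.Chars.isalnum d || (d == '_'))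

def pyIsIdentifier (s : String) : Bool := pvIdList s.toList

def sexpr_mangle (name : String) : String :=
  let ret := mangle_replace.foldl (fun r p => PySem.Str.replace r p.1 p.2) name
  let ret := if pyIskeyword name then mangle_prefix ++ ret else ret
  -- Python raises ValueError on the else branch; Pre_sexpr_mangle excludes those inputs
  if pyIsIdentifier (PySem.Str.replace ret "." "_DO_") then ret else ""

-- ===== PORT B =====
-- def _mangle_char(ch): if/elif chain over the 19 special characters
def pvMangleChar (c : Char) : String :=
  if c = '~' then "_SP_" else
  if c = '!' then "_EX_" else
  if c = '@' then "_AT_" else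
  if c = '#' then "_SH_" else
  if c = '$' then "_DL_" else
  if c = '%' then "_MO_" else
  if c = '^' then "_XO_" else
  if c = '&' then "_AN_" else
  if c = '*' then "_ST_" else
  if c = '-' then "_MI_" else
  if c = '+' then "_AD_" else
  if c = '=' then "_EQ_" else
  if c = '\\' then "_LS_" else
  if c = '|' then "_MD_" else
  if c = '?' then "_QU_" else
  if c = '/' then "_SL_" else
  if c = ',' then "_CO_" else
  if c = '<' then "_LT_" else
  if c = '>' then "_GT_" else
  String.singleton c

-- def _allowed(ch): ch.isalnum() or ch in '_.~!@#$%^&*-+=\|?/,<>'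
def pvAllowedB (c : Char) : Bool :=
  PySem.Chars.isalnum c || ("_.~!@#$%^&*-+=\\|?/,<>" : String).toList.contains c

def sexpr_mangle_alt (name : String) : String :=
  -- Python raises ValueError on the first branch; Pre_sexpr_mangle excludes those inputs
  if name.toList.isEmpty || PySem.Chars.isdigit (name.toList.headD ' ')
      || !(name.toList.all pvAllowedB) then ""
  else
    let ret := PySem.Str.join "" (name.toList.map pvMangleChar)
    if pyIskeyword name then mangle_prefix ++ ret else ret

-- ===== PRECONDITION & SPEC =====
-- Pre_ excludes exactly the inputs on which A raises ValueError (the mangled name, with '.'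
-- read as '_DO_', is not an identifier): name must be non-empty, consist of letters, digits
-- and the characters _.~!@#$%^&*-+=\|?/,<> , and not start with a digit.
def pvAllowed (c : Char) : Bool :=
  PySem.Chars.isalnum c ||
    c ∈ ['_', '.', '~', '!', '@', '#', '$', '%', '^', '&', '*', '-', '+', '=', '\\', '|', '?', '/', ',', '<', '>']

def Pre_sexpr_mangle (name : String) : Prop :=
  name.toList ≠ [] ∧ name.toList.all pvAllowed = true ∧
    PySem.Chars.isdigit (name.toList.headD ' ') = false

instance (name : String) : Decidable (Pre_sexpr_mangle name) := by unfold Pre_sexpr_mangle; infer_instance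

def pvWitness_sexpr_mangle : String := "foo-bar!"

def Spec_sexpr_mangle (name : String) (out : String) : Prop := out = sexpr_mangle_alt name
instance (name : String) (out : String) : Decidable (Spec_sexpr_mangle name out) := by unfold Spec_sexpr_mangle; infer_instance

-- ===== CLAIM (what is proved, stated in full; the proofs are below) =====
def Claim_equal_sexpr_mangle : Prop := ∀ (name : String), Dom_sexpr_mangle name → Pre_sexpr_mangle name → Spec_sexpr_mangle name (sexpr_mangle name)

-- ===== LEMMAS AND PROOFS =====

-- the combined per-character effect of the 19 replace passes (proof-side only)
def pvG (c : Char) : List Char :=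
  if c = '~' then ['_', 'S', 'P', '_'] else
  if c = '!' then ['_', 'E', 'X', '_'] else
  if c = '@' then ['_', 'A', 'T', '_'] else
  if c = '#' then ['_', 'S', 'H', '_'] else
  if c = '$' then ['_', 'D', 'L', '_'] else
  if c = '%' then ['_', 'M', 'O', '_'] else
  if c = '^' then ['_', 'X', 'O', '_'] else
  if c = '&' then ['_', 'A', 'N', '_'] else
  if c = '*' then ['_', 'S', 'T', '_'] else
  if c = '-' then ['_', 'M', 'I', '_'] else
  if c = '+' then ['_', 'A', 'D', '_'] else
  if c = '=' then ['_', 'E', 'Q', '_'] else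
  if c = '\\' then ['_', 'L', 'S', '_'] else
  if c = '|' then ['_', 'M', 'D', '_'] else
  if c = '?' then ['_', 'Q', 'U', '_'] else
  if c = '/' then ['_', 'S', 'L', '_'] else
  if c = ',' then ['_', 'C', 'O', '_'] else
  if c = '<' then ['_', 'L', 'T', '_'] else
  if c = '>' then ['_', 'G', 'T', '_'] else
  [c]

-- the '.' → '_DO_' pass, per character, and the whole-pipeline per-character map
def pvDot (c : Char) : List Char := if c = '.' then ['_', 'D', 'O', '_'] else [c]
def pvH (c : Char) : List Char := (pvG c).flatMap pvDot
def pvIdOk (c : Char) : Bool := PySem.Chars.isalnum c || (c == '_')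

-- one replace pass with a one-character pattern maps each character independently
theorem rep_single (a : Char) (t : List Char) (l : List Char) :
    PySem.Chars.replace l [a] t = l.flatMap (fun c => if c = a then t else [c]) := by
  have go : ∀ fuel l acc, l.length ≤ fuel →
      PySem.Chars.replace.go [a] t fuel l acc = acc.reverse ++ l.flatMap (fun c => if c = a then t else [c]) := by
    intro fuel
    induction fuel with
    | zero =>
      intro l acc h
      rw [PySem.Chars.replace.go.eq_def]
      cases l with
      | nil => simp
      | cons c cs => simp at h
    | succ n ih =>
      intro l acc h
      rw [PySem.Chars.replace.go.eq_def]
      cases l with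
      | nil => simp
      | cons c cs =>
        by_cases hc : c = a
        · subst hc
          simp only [List.isPrefixOf_cons₂, List.isPrefixOf_nil_left, Bool.and_true,
            beq_self_eq_true, if_pos, List.length_cons, List.drop_succ_cons, List.length_nil,
            List.drop_zero]
          rw [ih cs _ (by simpa using h)]
          simp
        · have hba : (a == c) = false := by simp [Ne.symm hc]
          simp only [List.isPrefixOf_cons₂, List.isPrefixOf_nil_left, Bool.and_true, hba,
            Bool.false_eq_true, if_false]
          rw [ih cs _ (by simpa using h)]
          simp [hc]
  simp only [PySem.Chars.replace]
  rw [if_neg (by simp : ¬(([a] : List Char).isEmpty = true))]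
  rw [go l.length l [] le_rfl]
  simp

theorem pvLitS0 : ("~" : String).toList = ['~'] := rfl
theorem pvLitT0 : ("_SP_" : String).toList = ['_', 'S', 'P', '_'] := rfl
theorem pvLitS1 : ("!" : String).toList = ['!'] := rfl
theorem pvLitT1 : ("_EX_" : String).toList = ['_', 'E', 'X', '_'] := rfl
theorem pvLitS2 : ("@" : String).toList = ['@'] := rfl
theorem pvLitT2 : ("_AT_" : String).toList = ['_', 'A', 'T', '_'] := rfl
theorem pvLitS3 : ("#" : String).toList = ['#'] := rfl
theorem pvLitT3 : ("_SH_" : String).toList = ['_', 'S', 'H', '_'] := rfl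
theorem pvLitS4 : ("$" : String).toList = ['$'] := rfl
theorem pvLitT4 : ("_DL_" : String).toList = ['_', 'D', 'L', '_'] := rfl
theorem pvLitS5 : ("%" : String).toList = ['%'] := rfl
theorem pvLitT5 : ("_MO_" : String).toList = ['_', 'M', 'O', '_'] := rfl
theorem pvLitS6 : ("^" : String).toList = ['^'] := rfl
theorem pvLitT6 : ("_XO_" : String).toList = ['_', 'X', 'O', '_'] := rfl
theorem pvLitS7 : ("&" : String).toList = ['&'] := rfl
theorem pvLitT7 : ("_AN_" : String).toList = ['_', 'A', 'N', '_'] := rfl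
theorem pvLitS8 : ("*" : String).toList = ['*'] := rfl
theorem pvLitT8 : ("_ST_" : String).toList = ['_', 'S', 'T', '_'] := rfl
theorem pvLitS9 : ("-" : String).toList = ['-'] := rfl
theorem pvLitT9 : ("_MI_" : String).toList = ['_', 'M', 'I', '_'] := rfl
theorem pvLitS10 : ("+" : String).toList = ['+'] := rfl
theorem pvLitT10 : ("_AD_" : String).toList = ['_', 'A', 'D', '_'] := rfl
theorem pvLitS11 : ("=" : String).toList = ['='] := rfl
theorem pvLitT11 : ("_EQ_" : String).toList = ['_', 'E', 'Q', '_'] := rfl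
theorem pvLitS12 : ("\\" : String).toList = ['\\'] := rfl
theorem pvLitT12 : ("_LS_" : String).toList = ['_', 'L', 'S', '_'] := rfl
theorem pvLitS13 : ("|" : String).toList = ['|'] := rfl
theorem pvLitT13 : ("_MD_" : String).toList = ['_', 'M', 'D', '_'] := rfl
theorem pvLitS14 : ("?" : String).toList = ['?'] := rfl
theorem pvLitT14 : ("_QU_" : String).toList = ['_', 'Q', 'U', '_'] := rfl
theorem pvLitS15 : ("/" : String).toList = ['/'] := rfl
theorem pvLitT15 : ("_SL_" : String).toList = ['_', 'S', 'L', '_'] := rfl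
theorem pvLitS16 : ("," : String).toList = [','] := rfl
theorem pvLitT16 : ("_CO_" : String).toList = ['_', 'C', 'O', '_'] := rfl
theorem pvLitS17 : ("<" : String).toList = ['<'] := rfl
theorem pvLitT17 : ("_LT_" : String).toList = ['_', 'L', 'T', '_'] := rfl
theorem pvLitS18 : (">" : String).toList = ['>'] := rfl
theorem pvLitT18 : ("_GT_" : String).toList = ['_', 'G', 'T', '_'] := rfl

-- A's chain of replaces is the single-character map pvG, applied once
theorem chainA (s : String) :
    (mangle_replace.foldl (fun r p => PySem.Str.replace r p.1 p.2) s).toList = s.toList.flatMap pvG := by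
  simp only [mangle_replace, List.foldl, PySem.Str.toList_replace, pvLitS0, pvLitT0, pvLitS1, pvLitT1, pvLitS2, pvLitT2, pvLitS3, pvLitT3, pvLitS4, pvLitT4, pvLitS5, pvLitT5, pvLitS6, pvLitT6, pvLitS7, pvLitT7, pvLitS8, pvLitT8, pvLitS9, pvLitT9, pvLitS10, pvLitT10, pvLitS11, pvLitT11, pvLitS12, pvLitT12, pvLitS13, pvLitT13, pvLitS14, pvLitT14, pvLitS15, pvLitT15, pvLitS16, pvLitT16, pvLitS17, pvLitT17, pvLitS18, pvLitT18]
  simp only [rep_single, List.flatMap_assoc]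
  apply List.flatMap_congr
  intro c _
  by_cases h0 : c = '~'
  · subst h0; decide
  by_cases h1 : c = '!'
  · subst h1; decide
  by_cases h2 : c = '@'
  · subst h2; decide
  by_cases h3 : c = '#'
  · subst h3; decide
  by_cases h4 : c = '$'
  · subst h4; decide
  by_cases h5 : c = '%'
  · subst h5; decide
  by_cases h6 : c = '^'
  · subst h6; decide
  by_cases h7 : c = '&'
  · subst h7; decide
  by_cases h8 : c = '*'
  · subst h8; decide
  by_cases h9 : c = '-'
  · subst h9; decide
  by_cases h10 : c = '+'
  · subst h10; decide
  by_cases h11 : c = '='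
  · subst h11; decide
  by_cases h12 : c = '\\'
  · subst h12; decide
  by_cases h13 : c = '|'
  · subst h13; decide
  by_cases h14 : c = '?'
  · subst h14; decide
  by_cases h15 : c = '/'
  · subst h15; decide
  by_cases h16 : c = ','
  · subst h16; decide
  by_cases h17 : c = '<'
  · subst h17; decide
  by_cases h18 : c = '>'
  · subst h18; decide
  simp [pvG, h0, h1, h2, h3, h4, h5, h6, h7, h8, h9, h10, h11, h12, h13, h14, h15, h16, h17, h18]

-- B's per-character elif chain is pvG as well
theorem mangleChar_eq_pvG (c : Char) : (pvMangleChar c).toList = pvG c := by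
  by_cases h0 : c = '~'
  · subst h0; decide
  by_cases h1 : c = '!'
  · subst h1; decide
  by_cases h2 : c = '@'
  · subst h2; decide
  by_cases h3 : c = '#'
  · subst h3; decide
  by_cases h4 : c = '$'
  · subst h4; decide
  by_cases h5 : c = '%'
  · subst h5; decide
  by_cases h6 : c = '^'
  · subst h6; decide
  by_cases h7 : c = '&'
  · subst h7; decide
  by_cases h8 : c = '*'
  · subst h8; decide
  by_cases h9 : c = '-'
  · subst h9; decide
  by_cases h10 : c = '+'
  · subst h10; decide
  by_cases h11 : c = '='
  · subst h11; decide
  by_cases h12 : c = '\\'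
  · subst h12; decide
  by_cases h13 : c = '|'
  · subst h13; decide
  by_cases h14 : c = '?'
  · subst h14; decide
  by_cases h15 : c = '/'
  · subst h15; decide
  by_cases h16 : c = ','
  · subst h16; decide
  by_cases h17 : c = '<'
  · subst h17; decide
  by_cases h18 : c = '>'
  · subst h18; decide
  simp [pvMangleChar, pvG, h0, h1, h2, h3, h4, h5, h6, h7, h8, h9, h10, h11, h12, h13, h14, h15, h16, h17, h18]

theorem join_nil_flatten (xss : List (List Char)) : PySem.Chars.join [] xss = xss.flatten := by
  simp only [PySem.Chars.join, List.intercalate]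
  induction xss with
  | nil => rfl
  | cons x xs ih => cases xs <;> simp_all [List.intersperse]

-- B's single pass computes pvG applied once per character
theorem chainB (s : String) :
    (PySem.Str.join "" (s.toList.map pvMangleChar)).toList = s.toList.flatMap pvG := by
  rw [PySem.Str.toList_join]
  simp only [List.map_map]
  rw [show ("" : String).toList = [] from rfl, join_nil_flatten]
  rw [show ((fun s => String.toList s) ∘ pvMangleChar) = pvG from funext fun c => mangleChar_eq_pvG c]
  exact List.flatMap_def.symm

-- Pre_'s character set and B's are the same predicate
theorem allowed_eq (c : Char) : pvAllowed c = pvAllowedB c := by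
  have hs : ("_.~!@#$%^&*-+=\\|?/,<>" : String).toList
      = ['_', '.', '~', '!', '@', '#', '$', '%', '^', '&', '*', '-', '+', '=', '\\', '|', '?', '/', ',', '<', '>'] := rfl
  simp [pvAllowed, pvAllowedB, hs, List.contains_eq_mem]

-- on an allowed non-digit character the pipeline keeps a good identifier head
theorem pvH_head (c : Char) (hA : pvAllowed c = true) (hd : PySem.Chars.isdigit c = false) :
    ∃ d ds, pvH c = d :: ds ∧ (PySem.Chars.isalpha d || (d == '_')) = true := by
  by_cases h : PySem.Chars.isalnum c = true
  · have halpha : PySem.Chars.isalpha c = true := by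
      simp [PySem.Chars.isalnum, hd] at h; exact h
    have hnotsp : ∀ x ∈ (['~', '!', '@', '#', '$', '%', '^', '&', '*', '-', '+', '=', '\\', '|', '?', '/', ',', '<', '>'] : List Char), c ≠ x := by
      intro x hx he
      subst he
      revert halpha
      fin_cases hx <;> decide
    have hG : pvG c = [c] := by
      simp only [pvG]
      rw [if_neg (hnotsp '~' (by simp)), if_neg (hnotsp '!' (by simp)), if_neg (hnotsp '@' (by simp)),
        if_neg (hnotsp '#' (by simp)), if_neg (hnotsp '$' (by simp)), if_neg (hnotsp '%' (by simp)),
        if_neg (hnotsp '^' (by simp)), if_neg (hnotsp '&' (by simp)), if_neg (hnotsp '*' (by simp)),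
        if_neg (hnotsp '-' (by simp)), if_neg (hnotsp '+' (by simp)), if_neg (hnotsp '=' (by simp)),
        if_neg (hnotsp '\\' (by simp)), if_neg (hnotsp '|' (by simp)), if_neg (hnotsp '?' (by simp)),
        if_neg (hnotsp '/' (by simp)), if_neg (hnotsp ',' (by simp)), if_neg (hnotsp '<' (by simp)),
        if_neg (hnotsp '>' (by simp))]
    have hdot : c ≠ '.' := by intro he; subst he; revert halpha; decide
    refine ⟨c, [], ?_, by simp [halpha]⟩
    simp [pvH, hG, pvDot, hdot]
  · have hm : c ∈ (['_', '.', '~', '!', '@', '#', '$', '%', '^', '&', '*', '-', '+', '=', '\\', '|', '?', '/', ',', '<', '>'] : List Char) := by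
      simp [pvAllowed, h] at hA
      simpa using hA
    fin_cases hm <;> exact ⟨_, _, rfl, by decide⟩

-- on an allowed character every produced character is identifier-safe, and some is produced
theorem pvH_all (c : Char) (hA : pvAllowed c = true) :
    (pvH c).all pvIdOk = true ∧ pvH c ≠ [] := by
  by_cases h : PySem.Chars.isalnum c = true
  · have hnotsp : ∀ x ∈ (['.', '~', '!', '@', '#', '$', '%', '^', '&', '*', '-', '+', '=', '\\', '|', '?', '/', ',', '<', '>'] : List Char), c ≠ x := by
      intro x hx he
      subst he
      revert h
      fin_cases hx <;> decide
    have hG : pvG c = [c] := by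
      simp only [pvG]
      rw [if_neg (hnotsp '~' (by simp)), if_neg (hnotsp '!' (by simp)), if_neg (hnotsp '@' (by simp)),
        if_neg (hnotsp '#' (by simp)), if_neg (hnotsp '$' (by simp)), if_neg (hnotsp '%' (by simp)),
        if_neg (hnotsp '^' (by simp)), if_neg (hnotsp '&' (by simp)), if_neg (hnotsp '*' (by simp)),
        if_neg (hnotsp '-' (by simp)), if_neg (hnotsp '+' (by simp)), if_neg (hnotsp '=' (by simp)),
        if_neg (hnotsp '\\' (by simp)), if_neg (hnotsp '|' (by simp)), if_neg (hnotsp '?' (by simp)),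
        if_neg (hnotsp '/' (by simp)), if_neg (hnotsp ',' (by simp)), if_neg (hnotsp '<' (by simp)),
        if_neg (hnotsp '>' (by simp))]
    have hdot : c ≠ '.' := hnotsp '.' (by simp)
    constructor
    · simp [pvH, hG, pvDot, hdot, pvIdOk, h]
    · simp [pvH, hG, pvDot, hdot]
  · have hm : c ∈ (['_', '.', '~', '!', '@', '#', '$', '%', '^', '&', '*', '-', '+', '=', '\\', '|', '?', '/', ',', '<', '>'] : List Char) := by
      simp [pvAllowed, h] at hA
      simpa using hA
    fin_cases hm <;> exact ⟨by decide, by decide⟩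

-- ===== VERDICT (by name: the statement is the Claim_ definition above) =====
theorem sexpr_mangle_spec : Claim_equal_sexpr_mangle := by
  intro name _ hPre
  obtain ⟨hne, hall, hhd⟩ := hPre
  unfold Spec_sexpr_mangle sexpr_mangle sexpr_mangle_alt
  -- the two mangled strings are equal
  have hmeq : (mangle_replace.foldl (fun r p => PySem.Str.replace r p.1 p.2) name)
      = PySem.Str.join "" (name.toList.map pvMangleChar) := by
    apply String.toList_inj.mp
    rw [chainA, chainB]
  -- B's guard is false
  have hallB : name.toList.all pvAllowedB = true := by
    rw [show pvAllowedB = pvAllowed from funext fun c => (allowed_eq c).symm]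
    exact hall
  have hBguard : ¬((name.toList.isEmpty || PySem.Chars.isdigit (name.toList.headD ' ')
      || !(name.toList.all pvAllowedB)) = true) := by
    have hhd' : PySem.Chars.isdigit (name.toList.head?.getD ' ') = false := by
      simpa [List.headD_eq_head?_getD] using hhd
    simp [List.isEmpty_iff, hne, hhd', hallB]
  rw [hmeq]
  -- A's guard is true
  have hdot : ∀ s : String, (PySem.Str.replace s "." "_DO_").toList = s.toList.flatMap pvDot := by
    intro s
    rw [PySem.Str.toList_replace, show ("." : String).toList = ['.'] from rfl,
      show ("_DO_" : String).toList = ['_', 'D', 'O', '_'] from rfl, rep_single]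
    rfl
  have hretl : (PySem.Str.join "" (name.toList.map pvMangleChar)).toList = name.toList.flatMap pvG := chainB name
  have hguard : pyIsIdentifier (PySem.Str.replace
      (if pyIskeyword name then mangle_prefix ++ PySem.Str.join "" (name.toList.map pvMangleChar)
       else PySem.Str.join "" (name.toList.map pvMangleChar)) "." "_DO_") = true := by
    unfold pyIsIdentifier
    rw [hdot]
    have hflat : ∀ l : List Char, l.all pvAllowed = true →
        ((l.flatMap pvG).flatMap pvDot).all pvIdOk = true := by
      intro l hl
      rw [List.flatMap_assoc]
      rw [List.all_eq_true] at hl ⊢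
      intro x hx
      rw [List.mem_flatMap] at hx
      obtain ⟨c, hc, hxc⟩ := hx
      have := (pvH_all c (hl c hc)).1
      rw [List.all_eq_true] at this
      exact this x hxc
    by_cases hkw : pyIskeyword name = true
    · rw [if_pos hkw]
      rw [String.toList_append, List.flatMap_append]
      have hpre : (mangle_prefix.toList).flatMap pvDot = ['_', 'S', '_'] := by decide
      rw [hpre, hretl]
      show pvIdList ('_' :: ('S' :: '_' :: (name.toList.flatMap pvG).flatMap pvDot)) = true
      have h2 := hflat name.toList hall
      simp only [pvIdList, List.all_cons, Bool.and_eq_true]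
      exact ⟨by decide, by decide, by decide, h2⟩
    · rw [if_neg hkw, hretl]
      obtain ⟨c0, t, hl⟩ := List.exists_cons_of_ne_nil hne
      rw [hl]
      have hc0A : pvAllowed c0 = true := by
        rw [List.all_eq_true] at hall
        exact hall c0 (by rw [hl]; simp)
      have hc0d : PySem.Chars.isdigit c0 = false := by
        rw [hl] at hhd; simpa using hhd
      obtain ⟨d, ds, hH, hdgood⟩ := pvH_head c0 hc0A hc0d
      have : ((c0 :: t).flatMap pvG).flatMap pvDot = d :: (ds ++ (t.flatMap pvG).flatMap pvDot) := by
        rw [List.flatMap_assoc, List.flatMap_cons, ← List.flatMap_assoc (l := t)]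
        rw [show (pvG c0).flatMap pvDot = pvH c0 from rfl, hH]
        simp
      rw [this]
      simp only [pvIdList, hdgood, Bool.true_and, List.all_append]
      have htall : t.all pvAllowed = true := by
        rw [List.all_eq_true] at hall ⊢
        intro x hx; exact hall x (by rw [hl]; exact List.mem_cons_of_mem _ hx)
      have h1 : ds.all pvIdOk = true := by
        have := (pvH_all c0 hc0A).1
        rw [hH] at this
        simp only [List.all_cons, Bool.and_eq_true] at this
        exact this.2
      have h2 : ((t.flatMap pvG).flatMap pvDot).all pvIdOk = true := hflat t htall
      simp only [Bool.and_eq_true]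
      exact ⟨h1, h2⟩
  rw [if_pos hguard, if_neg hBguard]
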